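-- pv_equiv track=rewrite | github.com/yujeong-shin/Algorithm_Study | 백준/Silver/17276. 배열 돌리기/배열 돌리기.py | makeArrWithDir
-- ===== SOURCE A (Python) =====
-- dx = [-1, -1, 0, 1, 1, 1, 0, -1]
--
-- dy = [0, 1, 1, 1, 0, -1, -1, -1]
--
-- def makeArrWithDir(n, d_idx):
--     mid = n//2
--     x, y = mid, mid
--     temp = []
--     while True:
--         nx, ny = x+dx[d_idx], y+dy[d_idx]
--         if 0 <= nx < n and 0 <= ny < n:
--             temp.append((nx, ny))
--             x, y = nx, ny
--         else:
--             break
--     return temp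
-- ===== SOURCE B (Python) =====
-- dx = [-1, -1, 0, 1, 1, 1, 0, -1]
--
-- dy = [0, 1, 1, 1, 0, -1, -1, -1]
--
-- def _cap(c, mid, n):
--     # per-axis bound on the number of steps; None = this axis imposes no bound
--     if c == 1:
--         return n - 1 - mid
--     if c == -1:
--         return mid
--     return None
--
-- def makeArrWithDir(n, d_idx):
--     mid = n // 2
--     dxv, dyv = dx[d_idx], dy[d_idx]
--     cx, cy = _cap(dxv, mid, n), _cap(dyv, mid, n)
--     if cx is None:
--         steps = cy
--     elif cy is None:
--         steps = cx
--     else: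
--         steps = min(cx, cy)
--     steps = max(0, steps)
--     return [(mid + k * dxv, mid + k * dyv) for k in range(1, steps + 1)]
-- ===== Notes on version B (the rewrite author's own statement) =====
-- stated objective: simpler
-- what changed: Replaced the per-step bounds-checking while-loop with a closed-form step count (min of per-axis caps from the direction components) and a single range comprehension.
import Mathlib
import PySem

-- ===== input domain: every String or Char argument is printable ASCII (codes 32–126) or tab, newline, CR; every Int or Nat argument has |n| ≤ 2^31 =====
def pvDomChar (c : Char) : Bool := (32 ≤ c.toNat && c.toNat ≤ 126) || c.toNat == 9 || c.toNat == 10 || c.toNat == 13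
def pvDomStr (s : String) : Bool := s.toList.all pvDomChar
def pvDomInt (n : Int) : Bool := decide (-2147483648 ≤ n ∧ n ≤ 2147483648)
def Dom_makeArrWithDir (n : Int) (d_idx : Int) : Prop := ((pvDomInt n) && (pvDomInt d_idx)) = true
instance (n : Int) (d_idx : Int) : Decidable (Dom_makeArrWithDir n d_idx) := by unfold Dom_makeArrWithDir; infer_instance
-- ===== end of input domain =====

-- B replaces A's per-step bounds-checking while-loop by a closed-form step count
-- (min of per-axis caps derived from the direction components) and one range comprehension.

-- ===== PORT A =====
def dxL : List Int := [-1, -1, 0, 1, 1, 1, 0, -1]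
def dyL : List Int := [0, 1, 1, 1, 0, -1, -1, -1]

-- A's 'while True' loop; the fuel only makes the recursion total (n.toNat+1 always suffices,
-- proved in the lemmas below), it is not part of the algorithm.
def loopA (n dxv dyv : Int) : Nat → Int → Int → List (Int × Int) → List (Int × Int)
  | 0, _, _, temp => temp
  | fuel + 1, x, y, temp =>
    let nx := x + dxv
    let ny := y + dyv
    if 0 ≤ nx ∧ nx < n ∧ 0 ≤ ny ∧ ny < n then
      loopA n dxv dyv fuel nx ny (temp ++ [(nx, ny)])
    else temp

def makeArrWithDir (n : Int) (d_idx : Int) : List (Int × Int) :=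
  let mid := PySem.Int.floordiv n 2
  match PySem.List.pyGet? dxL d_idx, PySem.List.pyGet? dyL d_idx with
  | some dxv, some dyv => loopA n dxv dyv (n.toNat + 1) mid mid []
  | _, _ => []  -- IndexError in Python; excluded by Pre_

-- ===== PORT B =====
def dxB : List Int := [-1, -1, 0, 1, 1, 1, 0, -1]
def dyB : List Int := [0, 1, 1, 1, 0, -1, -1, -1]

-- Source B's _cap helper: per-axis bound on the number of steps (none = no bound)
def capAt (c p n : Int) : Option Int :=
  if c = 1 then some (n - 1 - p)
  else if c = -1 then some p
  else none

-- the comprehension [(mid + k*dxv, mid + k*dyv) for k in range(1, max(0,s)+1)]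
def buildB (mid dxv dyv s : Int) : List (Int × Int) :=
  (PySem.List.pyRange 1 (max 0 s + 1) 1).map (fun k => (mid + k * dxv, mid + k * dyv))

def makeArrWithDir_alt (n : Int) (d_idx : Int) : List (Int × Int) :=
  let mid := PySem.Int.floordiv n 2
  match PySem.List.pyGet? dxB d_idx with
  | none => []  -- IndexError in Python; excluded by Pre_
  | some dxv =>
    match PySem.List.pyGet? dyB d_idx with
    | none => []  -- IndexError in Python; excluded by Pre_
    | some dyv =>
      match capAt dxv mid n with
      | none =>
        match capAt dyv mid n with
        | none => []  -- unreachable: every direction in the tables has a nonzero component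
        | some cy => buildB mid dxv dyv cy
      | some cx =>
        match capAt dyv mid n with
        | none => buildB mid dxv dyv cx
        | some cy => buildB mid dxv dyv (min cx cy)

-- ===== PRECONDITION & SPEC =====
-- Pre_ excludes exactly the d_idx outside the 8-element direction tables, where A raises IndexError.
def Pre_makeArrWithDir (n : Int) (d_idx : Int) : Prop := -8 ≤ d_idx ∧ d_idx < 8
instance (n : Int) (d_idx : Int) : Decidable (Pre_makeArrWithDir n d_idx) := by
  unfold Pre_makeArrWithDir; infer_instance

def pvWitness_makeArrWithDir : Int × Int := (5, 1)

def Spec_makeArrWithDir (n : Int) (d_idx : Int) (out : List (Int × Int)) : Prop := out = makeArrWithDir_alt n d_idx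
instance (n : Int) (d_idx : Int) (out : List (Int × Int)) : Decidable (Spec_makeArrWithDir n d_idx out) := by unfold Spec_makeArrWithDir; infer_instance

-- ===== CLAIM (what is proved, stated in full; the proofs are below) =====
def Claim_equal_makeArrWithDir : Prop := ∀ (n : Int) (d_idx : Int), Dom_makeArrWithDir n d_idx → Pre_makeArrWithDir n d_idx → Spec_makeArrWithDir n d_idx (makeArrWithDir n d_idx)

-- ===== LEMMAS AND PROOFS =====

-- closed-form number of loop iterations remaining from position (x, y)
def stepsO (n dxv dyv x y : Int) : Option Int :=
  match capAt dxv x n, capAt dyv y n with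
  | none, cy => cy
  | some cx, none => some cx
  | some cx, some cy => some (min cx cy)

def KNat (n dxv dyv x y : Int) : Nat :=
  match stepsO n dxv dyv x y with
  | some s => (max 0 s).toNat
  | none => 0

lemma K_iff (n dxv dyv x y : Int)
    (hdx : dxv = -1 ∨ dxv = 0 ∨ dxv = 1) (hdy : dyv = -1 ∨ dyv = 0 ∨ dyv = 1)
    (hnz : ¬(dxv = 0 ∧ dyv = 0))
    (hx0 : 0 ≤ x) (hx1 : x < n) (hy0 : 0 ≤ y) (hy1 : y < n) :
    ((0 ≤ x + dxv ∧ x + dxv < n ∧ 0 ≤ y + dyv ∧ y + dyv < n) ↔ 1 ≤ KNat n dxv dyv x y) := by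
  rcases hdx with rfl | rfl | rfl <;> rcases hdy with rfl | rfl | rfl <;>
    simp [KNat, stepsO, capAt] <;> omega

lemma K_step (n dxv dyv x y : Int)
    (hdx : dxv = -1 ∨ dxv = 0 ∨ dxv = 1) (hdy : dyv = -1 ∨ dyv = 0 ∨ dyv = 1)
    (h1 : 0 ≤ x + dxv) (h2 : x + dxv < n) (h3 : 0 ≤ y + dyv) (h4 : y + dyv < n) :
    KNat n dxv dyv (x + dxv) (y + dyv) = KNat n dxv dyv x y - 1 := by
  rcases hdx with rfl | rfl | rfl <;> rcases hdy with rfl | rfl | rfl <;>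
    simp [KNat, stepsO, capAt] <;> omega

lemma K_le (n dxv dyv x y : Int)
    (hdx : dxv = -1 ∨ dxv = 0 ∨ dxv = 1) (hdy : dyv = -1 ∨ dyv = 0 ∨ dyv = 1)
    (hx0 : 0 ≤ x) (hx1 : x < n) (hy0 : 0 ≤ y) (hy1 : y < n) :
    KNat n dxv dyv x y ≤ n.toNat := by
  rcases hdx with rfl | rfl | rfl <;> rcases hdy with rfl | rfl | rfl <;>
    simp [KNat, stepsO, capAt] <;> omega

def genL (x y dxv dyv : Int) (K : Nat) : List (Int × Int) :=
  (List.range K).map (fun (i : Nat) => (x + ((i : Int) + 1) * dxv, y + ((i : Int) + 1) * dyv))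

lemma genL_succ (x y dxv dyv : Int) (K : Nat) :
    genL x y dxv dyv (K + 1) = (x + dxv, y + dyv) :: genL (x + dxv) (y + dyv) dxv dyv K := by
  unfold genL
  rw [List.range_succ_eq_map, List.map_cons, List.map_map]
  congr 1
  · simp only [Nat.cast_zero, Prod.mk.injEq]; constructor <;> ring
  · apply List.map_congr_left
    intro i _
    simp only [Function.comp, Nat.succ_eq_add_one]
    push_cast
    simp only [Prod.mk.injEq]
    constructor <;> ring

lemma loopA_eq (n dxv dyv : Int)
    (hdx : dxv = -1 ∨ dxv = 0 ∨ dxv = 1) (hdy : dyv = -1 ∨ dyv = 0 ∨ dyv = 1)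
    (hnz : ¬(dxv = 0 ∧ dyv = 0)) :
    ∀ (fuel : Nat) (x y : Int) (acc : List (Int × Int)),
      0 ≤ x → x < n → 0 ≤ y → y < n →
      KNat n dxv dyv x y ≤ fuel →
      loopA n dxv dyv fuel x y acc = acc ++ genL x y dxv dyv (KNat n dxv dyv x y) := by
  intro fuel
  induction fuel with
  | zero =>
    intro x y acc hx0 hx1 hy0 hy1 hfuel
    have hK : KNat n dxv dyv x y = 0 := by omega
    simp [loopA, hK, genL]
  | succ fuel ih =>
    intro x y acc hx0 hx1 hy0 hy1 hfuel
    by_cases hc : 0 ≤ x + dxv ∧ x + dxv < n ∧ 0 ≤ y + dyv ∧ y + dyv < n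
    · obtain ⟨h1, h2, h3, h4⟩ := hc
      have hK1 : 1 ≤ KNat n dxv dyv x y :=
        (K_iff n dxv dyv x y hdx hdy hnz hx0 hx1 hy0 hy1).mp ⟨h1, h2, h3, h4⟩
      have hKs : KNat n dxv dyv (x + dxv) (y + dyv) = KNat n dxv dyv x y - 1 :=
        K_step n dxv dyv x y hdx hdy h1 h2 h3 h4
      have hstep : loopA n dxv dyv (fuel + 1) x y acc
          = loopA n dxv dyv fuel (x + dxv) (y + dyv) (acc ++ [(x + dxv, y + dyv)]) := by
        simp [loopA, h1, h2, h3, h4]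
      rw [hstep, ih (x + dxv) (y + dyv) _ h1 h2 h3 h4 (by omega)]
      have hKeq : KNat n dxv dyv x y = (KNat n dxv dyv x y - 1) + 1 := by omega
      rw [hKs, hKeq, genL_succ]
      simp
    · have hK : KNat n dxv dyv x y = 0 := by
        by_contra h
        exact hc ((K_iff n dxv dyv x y hdx hdy hnz hx0 hx1 hy0 hy1).mpr (by omega))
      have hstop : loopA n dxv dyv (fuel + 1) x y acc = acc := by
        simp only [loopA]
        rw [if_neg hc]
      simp [hstop, hK, genL]

lemma buildB_eq (mid dxv dyv s : Int) :
    buildB mid dxv dyv s = genL mid mid dxv dyv (max 0 s).toNat := by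
  unfold buildB genL
  rw [PySem.List.pyRange_one]
  have h : (max 0 s + 1 - 1).toNat = (max 0 s).toNat := by omega
  rw [h, List.map_map]
  apply List.map_congr_left
  intro i _
  simp only [Function.comp, Prod.mk.injEq]
  constructor <;> ring

-- B's inner computation equals the K-indexed comprehension
lemma alt_core_eq (n dxv dyv : Int)
    (hdx : dxv = -1 ∨ dxv = 0 ∨ dxv = 1) (hdy : dyv = -1 ∨ dyv = 0 ∨ dyv = 1)
    (hnz : ¬(dxv = 0 ∧ dyv = 0)) (mid : Int) :
    (match capAt dxv mid n, capAt dyv mid n with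
      | none, none => ([] : List (Int × Int))
      | none, some cy => buildB mid dxv dyv cy
      | some cx, none => buildB mid dxv dyv cx
      | some cx, some cy => buildB mid dxv dyv (min cx cy))
      = genL mid mid dxv dyv (KNat n dxv dyv mid mid) := by
  rcases hdx with rfl | rfl | rfl <;> rcases hdy with rfl | rfl | rfl <;>
    simp [capAt, KNat, stepsO, buildB_eq] at hnz ⊢

lemma core_eq (n dxv dyv : Int)
    (hdx : dxv = -1 ∨ dxv = 0 ∨ dxv = 1) (hdy : dyv = -1 ∨ dyv = 0 ∨ dyv = 1)
    (hnz : ¬(dxv = 0 ∧ dyv = 0)) (mid : Int) (hm : mid = n / 2) :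
    loopA n dxv dyv (n.toNat + 1) mid mid []
      = (match capAt dxv mid n, capAt dyv mid n with
          | none, none => ([] : List (Int × Int))
          | none, some cy => buildB mid dxv dyv cy
          | some cx, none => buildB mid dxv dyv cx
          | some cx, some cy => buildB mid dxv dyv (min cx cy)) := by
  subst hm
  rw [alt_core_eq n dxv dyv hdx hdy hnz]
  by_cases hn : 1 ≤ n
  · have hx0 : 0 ≤ n / 2 := by omega
    have hx1 : n / 2 < n := by omega
    have hKle := K_le n dxv dyv _ _ hdx hdy hx0 hx1 hx0 hx1
    rw [loopA_eq n dxv dyv hdx hdy hnz (n.toNat + 1) _ _ [] hx0 hx1 hx0 hx1 (by omega)]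
    simp
  · -- n ≤ 0: both sides are empty
    have hK : KNat n dxv dyv (n / 2) (n / 2) = 0 := by
      rcases hdx with rfl | rfl | rfl <;> rcases hdy with rfl | rfl | rfl <;>
        simp [KNat, stepsO, capAt] <;> omega
    have hloop : loopA n dxv dyv (n.toNat + 1) (n / 2) (n / 2) [] = [] := by
      have hfuel : n.toNat + 1 = 1 := by omega
      rw [hfuel]
      simp only [loopA]
      rw [if_neg (by omega)]
    rw [hloop, hK]
    simp [genL]

-- ===== VERDICT (by name: the statement is the Claim_ definition above) =====
theorem makeArrWithDir_spec : Claim_equal_makeArrWithDir := by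
  intro n d_idx _ hPre
  unfold Spec_makeArrWithDir
  obtain ⟨h1, h2⟩ := hPre
  unfold makeArrWithDir makeArrWithDir_alt
  interval_cases d_idx <;>
    simp only [dxL, dyL, dxB, dyB, PySem.List.pyGet?, PySem.List.pyIdx?] <;> norm_num <;>
    refine core_eq n _ _ ?_ ?_ ?_ _ ?_ <;> first | decide | norm_num
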